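-- pv_equiv track=rewrite | github.com/thangduong3010/Python | Practice/code_fight_metrocard.py | metroCard
-- ===== SOURCE A (Python) =====
-- def metroCard(lastNumberOfDays):
-- 	weekDay = [31, 28, 31, 30, 31, 30, 31, 31, 30, 31, 30, 31]
-- 	possibleDays = []
--
-- 	for day in range(len(weekDay)):
-- 		if lastNumberOfDays == weekDay[day]:
-- 			if day == len(weekDay) - 1:
-- 				if 31 not in possibleDays:
-- 					possibleDays.insert(day, 31)
-- 			else:
-- 				if weekDay[day+1] not in possibleDays:
-- 					possibleDays.insert(day, weekDay[day+1])
--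
-- 	return possibleDays
-- ===== SOURCE B (Python) =====
-- def metroCard(lastNumberOfDays):
--     weekDay = [31, 28, 31, 30, 31, 30, 31, 31, 30, 31, 30, 31]
--     mapping = {}
--     for i, days in enumerate(weekDay):
--         succ = weekDay[(i + 1) % 12]
--         bucket = mapping.setdefault(days, [])
--         if succ not in bucket:
--             bucket.append(succ)
--     return mapping.get(lastNumberOfDays, [])
-- ===== Notes on version B (the rewrite author's own statement) =====
-- stated objective: simpler
-- what changed: B precomputes a month-length -> next-month-lengths dict in one pass over the calendar (setdefault + dedup append of the cyclic successor) and reduces the body to a single mapping.get lookup, instead of A's input-driven scan with insert-at-index.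
import Mathlib
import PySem

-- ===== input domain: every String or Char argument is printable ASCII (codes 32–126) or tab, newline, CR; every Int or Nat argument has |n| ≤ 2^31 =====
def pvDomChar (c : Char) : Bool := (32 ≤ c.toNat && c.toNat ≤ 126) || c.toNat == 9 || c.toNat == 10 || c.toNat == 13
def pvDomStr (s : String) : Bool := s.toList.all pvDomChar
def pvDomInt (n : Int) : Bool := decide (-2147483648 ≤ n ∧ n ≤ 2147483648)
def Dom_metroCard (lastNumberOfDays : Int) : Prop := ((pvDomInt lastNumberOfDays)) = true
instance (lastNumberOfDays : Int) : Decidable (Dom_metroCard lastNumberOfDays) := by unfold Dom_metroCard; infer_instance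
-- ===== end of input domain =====

-- B builds a successor-length table once and answers with a single dict lookup, replacing A's filtering scan: simpler.

-- ===== PORT A =====
def metroCard (lastNumberOfDays : Int) : List Int :=
  let weekDay : List Int := [31, 28, 31, 30, 31, 30, 31, 31, 30, 31, 30, 31]
  (PySem.List.pyRange 0 (weekDay.length : Int) 1).foldl
    (fun possibleDays day =>
      if lastNumberOfDays = PySem.List.pyGetD weekDay day 0 then
        if day = (weekDay.length : Int) - 1 then
          if (31 : Int) ∈ possibleDays then possibleDays
          else PySem.List.insert possibleDays day 31
        else
          if PySem.List.pyGetD weekDay (day + 1) 0 ∈ possibleDays then possibleDays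
          else PySem.List.insert possibleDays day (PySem.List.pyGetD weekDay (day + 1) 0)
      else possibleDays) []

-- ===== PORT B =====
def metroCard_alt (lastNumberOfDays : Int) : List Int :=
  let weekDay : List Int := [31, 28, 31, 30, 31, 30, 31, 31, 30, 31, 30, 31]
  let mapping : PySem.Dict Int (List Int) :=
    (PySem.List.enumerate weekDay).foldl
      (fun m p =>
        let succ := PySem.List.pyGetD weekDay (PySem.Int.mod (p.1 + 1) 12) 0
        let bucket := (m.setdefault p.2 []).getD p.2 []
        if succ ∈ bucket then m.setdefault p.2 []
        else (m.setdefault p.2 []).insert p.2 (bucket ++ [succ]))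
      PySem.Dict.empty
  mapping.getD lastNumberOfDays []

-- ===== PRECONDITION & SPEC =====
def Spec_metroCard (lastNumberOfDays : Int) (out : List Int) : Prop := out = metroCard_alt lastNumberOfDays
instance (lastNumberOfDays : Int) (out : List Int) : Decidable (Spec_metroCard lastNumberOfDays out) := by unfold Spec_metroCard; infer_instance

-- ===== CLAIM (what is proved, stated in full; the proofs are below) =====
def Claim_equal_metroCard : Prop := ∀ (lastNumberOfDays : Int), Dom_metroCard lastNumberOfDays → Spec_metroCard lastNumberOfDays (metroCard lastNumberOfDays)

-- ===== LEMMAS AND PROOFS =====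
-- B's table does not depend on the queried length: the whole alt port is one literal dict lookup.
theorem metroCard_alt_eq (x : Int) :
    metroCard_alt x =
      (PySem.Dict.mk [(31, [28, 30, 31]), (28, [31]), (30, [31])]).getD x [] := by
  unfold metroCard_alt
  congr 1

-- the loop range of A, evaluated once (kept out of `decide` for speed)
theorem pv_range_eq :
    PySem.List.pyRange 0 (([31, 28, 31, 30, 31, 30, 31, 31, 30, 31, 30, 31] : List Int).length : Int) 1
      = [0, 1, 2, 3, 4, 5, 6, 7, 8, 9, 10, 11] := by
  rw [PySem.List.pyRange_zero_nat]
  decide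

theorem pv_foldl_fix {α β : Type} (f : α → β → α) :
    ∀ (L : List β) (acc : α), (∀ acc b, b ∈ L → f acc b = acc) → L.foldl f acc = acc := by
  intro L
  induction L with
  | nil => intro acc _; rfl
  | cons b t ih =>
    intro acc h
    rw [List.foldl_cons, h acc b (by simp)]
    exact ih acc (fun a c hc => h a c (by simp [hc]))

theorem metroCard_other (x : Int) (h31 : x ≠ 31) (h28 : x ≠ 28) (h30 : x ≠ 30) :
    metroCard x = [] := by
  simp only [metroCard]
  rw [pv_range_eq]
  apply pv_foldl_fix
  intro acc d hd
  have hvals : ∀ d ∈ ([0, 1, 2, 3, 4, 5, 6, 7, 8, 9, 10, 11] : List Int),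
      PySem.List.pyGetD ([31, 28, 31, 30, 31, 30, 31, 31, 30, 31, 30, 31] : List Int) d 0 = 31 ∨
      PySem.List.pyGetD ([31, 28, 31, 30, 31, 30, 31, 31, 30, 31, 30, 31] : List Int) d 0 = 28 ∨
      PySem.List.pyGetD ([31, 28, 31, 30, 31, 30, 31, 31, 30, 31, 30, 31] : List Int) d 0 = 30 := by
    decide
  rcases hvals d hd with h | h | h <;> rw [h]
  · rw [if_neg h31]
  · rw [if_neg h28]
  · rw [if_neg h30]

theorem metroCard_at (x : Int) (out : List Int)
    (h : ([0, 1, 2, 3, 4, 5, 6, 7, 8, 9, 10, 11] : List Int).foldl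
      (fun possibleDays day =>
        if x = PySem.List.pyGetD ([31, 28, 31, 30, 31, 30, 31, 31, 30, 31, 30, 31] : List Int) day 0 then
          if day = (([31, 28, 31, 30, 31, 30, 31, 31, 30, 31, 30, 31] : List Int).length : Int) - 1 then
            if (31 : Int) ∈ possibleDays then possibleDays
            else PySem.List.insert possibleDays day 31
          else
            if PySem.List.pyGetD ([31, 28, 31, 30, 31, 30, 31, 31, 30, 31, 30, 31] : List Int) (day + 1) 0 ∈ possibleDays then possibleDays
            else PySem.List.insert possibleDays day (PySem.List.pyGetD ([31, 28, 31, 30, 31, 30, 31, 31, 30, 31, 30, 31] : List Int) (day + 1) 0)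
        else possibleDays) [] = out) :
    metroCard x = out := by
  simp only [metroCard]
  rw [pv_range_eq]
  exact h

-- ===== VERDICT =====
theorem metroCard_spec : Claim_equal_metroCard := by
  intro x _
  show metroCard x = metroCard_alt x
  rw [metroCard_alt_eq]
  by_cases h31 : x = 31
  · subst h31; rw [metroCard_at 31 [28, 30, 31] (by decide)]; decide
  by_cases h28 : x = 28
  · subst h28; rw [metroCard_at 28 [31] (by decide)]; decide
  by_cases h30 : x = 30
  · subst h30; rw [metroCard_at 30 [31] (by decide)]; decide
  rw [metroCard_other x h31 h28 h30]
  simp [PySem.Dict.getD, PySem.Dict.get?, Ne.symm h31, Ne.symm h28, Ne.symm h30]
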